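-- pv_equiv track=rewrite | github.com/tangwh20/ARC | scripts/generate/generate_text.py | get_concepts_from_content
-- ===== SOURCE A (Python) =====
-- def get_concepts_from_content(content: str):
--     concepts = []
--     lines = content.split("\n")
--     for i, line in enumerate(lines):
--         if "# concepts:" in line:
--             in_line_concepts = lines[i][12:]
--             if in_line_concepts.strip() != "":
--                 concepts.extend(lines[i][12:].split(","))
--             while i+1 < len(lines) and lines[i+1].startswith("# ") and not lines[i+1].startswith("# description:"):
--                 concepts.extend(lines[i+1][2:].split(","))
--                 i += 1
--             concepts = [c.strip() for c in concepts]
--             break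
--     return concepts
-- ===== SOURCE B (Python) =====
-- def get_concepts_from_content(content: str):
--     # Single uniform pass over every line, driven by an explicit 3-state
--     # machine (0 = seeking the marker, 1 = collecting the block, 2 = done).
--     state = 0
--     pieces = []
--     for line in content.split("\n"):
--         if state == 0:
--             if "# concepts:" in line:
--                 if line[12:].strip() != "":
--                     pieces = line[12:].split(",")
--                 state = 1
--         elif state == 1:
--             if line.startswith("# ") and not line.startswith("# description:"):
--                 pieces += line[2:].split(",")
--             else:
--                 state = 2
--     return [c.strip() for c in pieces]
-- ===== Notes on version B (the rewrite author's own statement) =====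
-- stated objective: alternative
-- what changed: Replaces A's find-the-marker loop with break plus a nested index-mutating while by one uniform pass over all lines driven by an explicit 3-state machine (seek/collect/done) accumulator; no indexing, no inner loop, no break.
import Mathlib
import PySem

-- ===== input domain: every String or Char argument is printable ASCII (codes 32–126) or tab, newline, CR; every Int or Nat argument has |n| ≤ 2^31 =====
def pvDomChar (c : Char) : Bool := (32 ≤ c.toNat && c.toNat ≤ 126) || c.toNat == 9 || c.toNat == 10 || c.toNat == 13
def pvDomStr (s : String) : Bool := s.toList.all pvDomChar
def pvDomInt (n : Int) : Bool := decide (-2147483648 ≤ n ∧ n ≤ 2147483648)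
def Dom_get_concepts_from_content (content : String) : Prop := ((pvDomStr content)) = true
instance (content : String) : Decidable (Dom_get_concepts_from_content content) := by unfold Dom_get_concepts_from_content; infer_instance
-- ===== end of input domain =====

-- B replaces A's find-the-marker loop with break plus a nested index-mutating while by a
-- single uniform fold over all lines driven by an explicit 3-state machine (seek/collect/done);
-- objective: alternative decomposition, same linear cost.

-- ===== PORT A =====
-- while i+1 < len(lines) and lines[i+1].startswith("# ") and not lines[i+1].startswith("# description:"):
--     concepts.extend(lines[i+1][2:].split(",")); i += 1
def pvA_while (lines : List String) (i : Nat) (concepts : List String) : List String :=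
  if h : i + 1 < lines.length then
    if PySem.Str.startswith lines[i+1] "# " && !PySem.Str.startswith lines[i+1] "# description:" then
      pvA_while lines (i+1) (concepts ++ (PySem.Str.split? (PySem.Str.slice lines[i+1] (some 2) none) ",").getD [])
    else concepts
  else concepts
termination_by lines.length - i

-- for i, line in enumerate(lines): if "# concepts:" in line: … break   (first match wins)
def pvA_find (lines suffix : List String) (i : Nat) : List String :=
  match suffix with
  | [] => []
  | line :: rest =>
    if PySem.Str.isIn "# concepts:" line then
      let inline := PySem.Str.slice line (some 12) none
      let concepts := if PySem.Str.strip inline ≠ "" then (PySem.Str.split? (PySem.Str.slice line (some 12) none) ",").getD [] else []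
      (pvA_while lines i concepts).map PySem.Str.strip
    else pvA_find lines rest (i+1)

def get_concepts_from_content (content : String) : List String :=
  let lines := (PySem.Str.split? content "\n").getD []
  pvA_find lines lines 0

-- ===== PORT B =====
-- the loop body of Source B: state 0 = seeking, 1 = collecting, 2 = done
def pvB_step (s : Nat × List String) (line : String) : Nat × List String :=
  match s with
  | (0, pieces) =>
    if PySem.Str.isIn "# concepts:" line then
      (1, if PySem.Str.strip (PySem.Str.slice line (some 12) none) ≠ "" then
            (PySem.Str.split? (PySem.Str.slice line (some 12) none) ",").getD []
          else pieces)
    else (0, pieces)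
  | (1, pieces) =>
    if PySem.Str.startswith line "# " && !PySem.Str.startswith line "# description:" then
      (1, pieces ++ (PySem.Str.split? (PySem.Str.slice line (some 2) none) ",").getD [])
    else (2, pieces)
  | (n+2, pieces) => (n+2, pieces)

def get_concepts_from_content_alt (content : String) : List String :=
  let lines := (PySem.Str.split? content "\n").getD []
  ((lines.foldl pvB_step (0, [])).2).map PySem.Str.strip

-- ===== PRECONDITION & SPEC =====
def Spec_get_concepts_from_content (content : String) (out : List String) : Prop := out = get_concepts_from_content_alt content
instance (content : String) (out : List String) : Decidable (Spec_get_concepts_from_content content out) := by unfold Spec_get_concepts_from_content; infer_instance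

-- ===== CLAIM (what is proved, stated in full; the proofs are below) =====
def Claim_equal_get_concepts_from_content : Prop := ∀ (content : String), Dom_get_concepts_from_content content → Spec_get_concepts_from_content content (get_concepts_from_content content)

-- ===== LEMMAS AND PROOFS =====
def pvCont (l : String) : Bool :=
  PySem.Str.startswith l "# " && !PySem.Str.startswith l "# description:"

def pvSplit (l : String) : List String :=
  (PySem.Str.split? (PySem.Str.slice l (some 2) none) ",").getD []

def pvInline (l : String) : List String :=
  if PySem.Str.strip (PySem.Str.slice l (some 12) none) ≠ "" then
    (PySem.Str.split? (PySem.Str.slice l (some 12) none) ",").getD []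
  else []

set_option maxHeartbeats 1000000 in
lemma pvA_while_fuel (lines : List String) : ∀ (n i : Nat) (concepts : List String),
    lines.length ≤ i + n →
    pvA_while lines i concepts =
      concepts ++ ((lines.drop (i+1)).takeWhile pvCont).flatMap pvSplit := by
  intro n
  induction n with
  | zero =>
      intro i concepts h
      rw [pvA_while, dif_neg (by omega), List.drop_eq_nil_of_le (by omega)]
      simp
  | succ n ih =>
      intro i concepts h
      rw [pvA_while]
      by_cases h1 : i + 1 < lines.length
      · rw [dif_pos h1]
        by_cases hc : (PySem.Str.startswith lines[i+1] "# " &&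
            !PySem.Str.startswith lines[i+1] "# description:") = true
        · rw [if_pos hc, ih (i+1) _ (by omega), List.drop_eq_getElem_cons h1,
            List.takeWhile_cons, show pvCont lines[i+1] = true from hc]
          simp [pvSplit, -List.getElem_cons_drop]
        · have hc' : (PySem.Str.startswith lines[i+1] "# " &&
              !PySem.Str.startswith lines[i+1] "# description:") = false := by
            simpa using hc
          rw [if_neg hc, List.drop_eq_getElem_cons h1, List.takeWhile_cons,
            show pvCont lines[i+1] = false from hc']
          simp [-List.getElem_cons_drop]
      · rw [dif_neg h1, List.drop_eq_nil_of_le (by omega)]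
        simp

lemma pvA_while_eq (lines : List String) (i : Nat) (concepts : List String) :
    pvA_while lines i concepts =
      concepts ++ ((lines.drop (i+1)).takeWhile pvCont).flatMap pvSplit :=
  pvA_while_fuel lines lines.length i concepts (by omega)

-- A's result, characterized over the suffix being scanned
lemma pvA_find_spec (lines : List String) : ∀ (suffix : List String) (i : Nat),
    suffix = lines.drop i →
    pvA_find lines suffix i =
      match suffix with
      | [] => []
      | line :: rest =>
        if PySem.Str.isIn "# concepts:" line then
          (pvInline line ++ (rest.takeWhile pvCont).flatMap pvSplit).map PySem.Str.strip
        else pvA_find lines rest (i+1) := by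
  intro suffix
  cases suffix with
  | nil => intro i _; rfl
  | cons line rest =>
      intro i hs
      have hrest : rest = lines.drop (i+1) := by
        have := congrArg List.tail hs
        simpa [List.tail_drop] using this
      by_cases hp : PySem.Str.isIn "# concepts:" line = true
      · rw [pvA_find, if_pos hp]
        simp only [hp, if_true]
        rw [pvA_while_eq, ← hrest]
        rfl
      · have hp' : PySem.Str.isIn "# concepts:" line = false := by simpa using hp
        rw [pvA_find, if_neg hp]
        simp only [hp', Bool.false_eq_true, if_false]

-- B's fold: once done, nothing changes
lemma pvB_done (l : List String) (pieces : List String) :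
    l.foldl pvB_step (2, pieces) = (2, pieces) := by
  induction l with
  | nil => rfl
  | cons a l ih => simpa [pvB_step] using ih

-- B's fold in collecting state
lemma pvB_collect (l : List String) : ∀ (pieces : List String),
    (l.foldl pvB_step (1, pieces)).2 = pieces ++ (l.takeWhile pvCont).flatMap pvSplit := by
  induction l with
  | nil => intro pieces; simp
  | cons a l ih =>
      intro pieces
      by_cases hc : pvCont a = true
      · have hstep : pvB_step (1, pieces) a = (1, pieces ++ pvSplit a) := by
          have hb := hc; unfold pvCont at hb
          simp only [pvB_step, hb]
          norm_num [pvSplit]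
        rw [List.foldl_cons, hstep, ih, List.takeWhile_cons, hc]
        simp
      · have hc' : (PySem.Str.startswith a "# " && !PySem.Str.startswith a "# description:") = false := by
          simpa [pvCont] using hc
        have hstep : pvB_step (1, pieces) a = (2, pieces) := by
          simp only [pvB_step, hc']
          norm_num
        rw [List.foldl_cons, hstep, pvB_done, List.takeWhile_cons]
        simp [hc]

-- B's fold in seeking state equals A's scan
set_option maxHeartbeats 1000000 in
lemma pvB_seek (lines : List String) : ∀ (suffix : List String) (i : Nat),
    suffix = lines.drop i →
    ((suffix.foldl pvB_step (0, [])).2).map PySem.Str.strip = pvA_find lines suffix i := by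
  intro suffix
  induction suffix with
  | nil => intro i _; rfl
  | cons line rest ih =>
      intro i hs
      have hrest : rest = lines.drop (i+1) := by
        have := congrArg List.tail hs
        simpa [List.tail_drop] using this
      rw [pvA_find_spec lines (line :: rest) i hs]
      by_cases hp : PySem.Str.isIn "# concepts:" line = true
      · have hstep : pvB_step (0, ([] : List String)) line = (1, pvInline line) := by
          simp only [pvB_step, hp, pvInline]
          norm_num
        simp only [hp, if_true, List.foldl_cons, hstep]
        rw [pvB_collect]
      · have hp' : PySem.Str.isIn "# concepts:" line = false := by simpa using hp
        have hstep : pvB_step (0, ([] : List String)) line = (0, []) := by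
          simp only [pvB_step, hp']
          norm_num
        simp only [hp', Bool.false_eq_true, if_false, List.foldl_cons, hstep]
        exact ih (i+1) hrest

-- ===== VERDICT (by name: the statement is the Claim_ definition above) =====
theorem get_concepts_from_content_spec : Claim_equal_get_concepts_from_content := by
  intro content _
  unfold Spec_get_concepts_from_content get_concepts_from_content get_concepts_from_content_alt
  exact (pvB_seek ((PySem.Str.split? content "\n").getD []) _ 0 (by simp)).symm
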